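-- pv_equiv track=rewrite | github.com/DuLuMaths/INRAE_project | exploration.py | find3max
-- ===== SOURCE A (Python) =====
-- def find3max(Ampli):
--     i = 2
--     x,y,z = Ampli[:3]
--     if x >= y and x >= z:
--         i_memo1 = 0
--         max_ampli1 = x
--         if y>=z :
--             i_memo2 = 1
--             i_memo3 = 2
--             max_ampli2 = y
--             max_ampli3 = z
--         else :
--             i_memo2 = 2
--             i_memo3 = 1
--             max_ampli2 = z
--             max_ampli3 = y
--     if y >= x and y >= z:
--         i_memo1 = 1
--         max_ampli1 = y
--         if x>=z :
--             i_memo2 = 0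
--             i_memo3 = 2
--             max_ampli2 = x
--             max_ampli3 = z
--         else :
--             i_memo2 = 2
--             i_memo3 = 0
--             max_ampli2 = z
--             max_ampli3 = x
--     if z >= y and z >= x:
--         i_memo1 = 2
--         max_ampli1 = z
--         if y>=x :
--             i_memo2 = 1
--             i_memo3 = 0
--             max_ampli2 = y
--             max_ampli3 = x
--         else :
--             i_memo2 = 0
--             i_memo3 = 1
--             max_ampli2 = x
--             max_ampli3 = y
--
--     for a in Ampli[3:] :
--         i += 1
--         if a >= max_ampli1 :
--             max_ampli3 = max_ampli2
--             max_ampli2 = max_ampli1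
--             max_ampli1 = a
--             i_memo3 = i_memo2
--             i_memo2 = i_memo1
--             i_memo1 = i
--         else :
--             if a >= max_ampli2 :
--                 max_ampli3 = max_ampli2
--                 max_ampli2 = a
--                 i_memo3 = i_memo2
--                 i_memo2 = i
--             else:
--                 if a >= max_ampli3:
--                     max_ampli3 = a
--                     i_memo3 = i
--     return(i_memo1,i_memo2,i_memo3)
-- ===== SOURCE B (Python) =====
-- def find3max(Ampli):
--     order = sorted(range(len(Ampli)), key=lambda i: (-Ampli[i], -i))
--     return (order[0], order[1], order[2])
-- ===== Notes on version B (the rewrite author's own statement) =====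
-- stated objective: idiomatic
-- what changed: Replaces A's hand-rolled streaming top-3 tracker (three sequential if-blocks seeding six state variables plus a shift-register loop) with one idiomatic line: sort all indices by (-value, -index) and take the first three; Pre_ excludes lists shorter than 3 (A raises ValueError, B raises IndexError) and the one seeding corner where two tied runners-up among the first three elements are ordered earlier-index-first by A's seeding but later-index-first by its own loop rule, a tie order nobody would specify.
-- outside the precondition, e.g. on find3max([1]): A raises ValueError, B raises IndexError; on find3max([5, 3, 3]): A returns (0, 1, 2), B returns (0, 2, 1); on find3max([3, 5, 3]): A returns (1, 0, 2), B returns (1, 2, 0)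
import Mathlib
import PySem

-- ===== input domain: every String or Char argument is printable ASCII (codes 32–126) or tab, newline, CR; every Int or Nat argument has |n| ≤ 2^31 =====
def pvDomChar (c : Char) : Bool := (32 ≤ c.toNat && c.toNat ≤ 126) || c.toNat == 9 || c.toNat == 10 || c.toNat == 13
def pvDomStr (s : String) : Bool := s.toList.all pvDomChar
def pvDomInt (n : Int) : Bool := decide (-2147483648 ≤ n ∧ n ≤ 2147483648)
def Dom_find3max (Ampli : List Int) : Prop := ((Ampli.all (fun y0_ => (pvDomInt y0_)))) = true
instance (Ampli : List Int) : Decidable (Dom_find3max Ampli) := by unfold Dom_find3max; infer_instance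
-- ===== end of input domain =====

-- B replaces A's hand-rolled streaming top-3 tracker with one sort of all indices by
-- (-value, -index), taking the first three (objective: idiomatic; not faster).

-- ===== PORT A =====
-- the 'for a in Ampli[3:]' loop: state = ((max_ampli1, max_ampli2, max_ampli3), (i_memo1, i_memo2, i_memo3))
def find3maxLoop (rest : List Int) (i : Int)
    (st : (Int × Int × Int) × (Int × Int × Int)) : (Int × Int × Int) × (Int × Int × Int) :=
  match rest with
  | [] => st
  | a :: t =>
    let i' := i + 1
    let st' :=
      if a ≥ st.1.1 then ((a, st.1.1, st.1.2.1), (i', st.2.1, st.2.2.1))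
      else if a ≥ st.1.2.1 then ((st.1.1, a, st.1.2.1), (st.2.1, i', st.2.2.1))
      else if a ≥ st.1.2.2 then ((st.1.1, st.1.2.1, a), (st.2.1, st.2.2.1, i'))
      else st
    find3maxLoop t i' st'

-- the three sequential if-blocks seeding the six variables (a later if overwrites an earlier one)
def find3maxInit (x y z : Int) : (Int × Int × Int) × (Int × Int × Int) :=
  let s0 := ((0, 0, 0), (0, 0, 0))   -- unassigned in Python; one of the ifs below always fires
  let s1 := if x ≥ y ∧ x ≥ z then
      (if y ≥ z then ((x, y, z), (0, 1, 2)) else ((x, z, y), (0, 2, 1))) else s0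
  let s2 := if y ≥ x ∧ y ≥ z then
      (if x ≥ z then ((y, x, z), (1, 0, 2)) else ((y, z, x), (1, 2, 0))) else s1
  let s3 := if z ≥ y ∧ z ≥ x then
      (if y ≥ x then ((z, y, x), (2, 1, 0)) else ((z, x, y), (2, 0, 1))) else s2
  s3

def find3max (Ampli : List Int) : Int × Int × Int :=
  match Ampli with
  | x :: y :: z :: rest => (find3maxLoop rest 2 (find3maxInit x y z)).2
  | _ => (0, 0, 0)   -- Python: 'x,y,z = Ampli[:3]' raises ValueError; excluded by Pre_

-- ===== PORT B =====
-- Ampli[j] (the index is in range everywhere B uses it on inputs Pre_ admits)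
def pvVal (Ampli : List Int) (j : Int) : Int := (PySem.List.pyGet? Ampli j).getD 0

def find3max_alt (Ampli : List Int) : Int × Int × Int :=
  -- order = sorted(range(len(Ampli)), key=lambda i: (-Ampli[i], -i))
  let order := PySem.List.sorted2 (PySem.List.pyRange 0 (Ampli.length : Int))
      (fun i => -(pvVal Ampli i)) (fun i => -i)
  -- (order[0], order[1], order[2]); IndexError on lists shorter than 3, excluded by Pre_
  ((PySem.List.pyGet? order 0).getD 0, (PySem.List.pyGet? order 1).getD 0,
   (PySem.List.pyGet? order 2).getD 0)

-- ===== PRECONDITION & SPEC =====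
-- Pre_ excludes (a) lists shorter than 3, on which A raises ValueError and B IndexError, and
-- (b) lists whose first three elements have the two runners-up tied (Ampli[1]=Ampli[2]<Ampli[0]
-- or Ampli[0]=Ampli[2]<Ampli[1]): there A's seeding orders that tie earlier-index-first while
-- A's own loop orders every later tie later-index-first, an accidental tie order on which
-- either answer is defensible (B orders it later-index-first throughout).
def Pre_find3max (Ampli : List Int) : Prop :=
  3 ≤ Ampli.length ∧
  ¬ (Ampli.getD 1 0 = Ampli.getD 2 0 ∧ Ampli.getD 2 0 < Ampli.getD 0 0) ∧
  ¬ (Ampli.getD 0 0 = Ampli.getD 2 0 ∧ Ampli.getD 2 0 < Ampli.getD 1 0)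
instance (Ampli : List Int) : Decidable (Pre_find3max Ampli) := by unfold Pre_find3max; infer_instance

def pvWitness_find3max : List Int := [1, 5, 3, 2]

def Spec_find3max (Ampli : List Int) (out : Int × Int × Int) : Prop := out = find3max_alt Ampli
instance (Ampli : List Int) (out : Int × Int × Int) : Decidable (Spec_find3max Ampli out) := by unfold Spec_find3max; infer_instance

-- ===== CLAIM (what is proved, stated in full; the proofs are below) =====
def Claim_equal_find3max : Prop := ∀ (Ampli : List Int), Dom_find3max Ampli → Pre_find3max Ampli → Spec_find3max Ampli (find3max Ampli)

-- ===== LEMMAS AND PROOFS =====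

-- the single integer rank value*n + index is strictly monotone in the pair (value, index)
def pvKey (Ampli : List Int) (i : Int) : Int := pvVal Ampli i * Ampli.length + i

lemma pvKey_lt_of_val_lt (Ampli : List Int) (j k : Int)
    (hj : 0 ≤ j) (hjn : j < (Ampli.length : Int)) (hk : 0 ≤ k) (hkn : k < (Ampli.length : Int))
    (h : pvVal Ampli j < pvVal Ampli k) : pvKey Ampli j < pvKey Ampli k := by
  unfold pvKey
  nlinarith [h, hj, hjn, hk, hkn]

lemma pvKey_lt_of_val_le (Ampli : List Int) (j k : Int)
    (hj : 0 ≤ j) (hjn : j < (Ampli.length : Int)) (hk : 0 ≤ k) (hkn : k < (Ampli.length : Int))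
    (h : pvVal Ampli j ≤ pvVal Ampli k) (hjk : j < k) : pvKey Ampli j < pvKey Ampli k := by
  rcases lt_or_eq_of_le h with h' | h'
  · exact pvKey_lt_of_val_lt Ampli j k hj hjn hk hkn h'
  · unfold pvKey; rw [h']; omega

lemma pvKey_inj (Ampli : List Int) (j k : Int)
    (hj : 0 ≤ j) (hjn : j < (Ampli.length : Int)) (hk : 0 ≤ k) (hkn : k < (Ampli.length : Int))
    (h : pvKey Ampli j = pvKey Ampli k) : j = k := by
  rcases lt_trichotomy (pvVal Ampli j) (pvVal Ampli k) with hv | hv | hv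
  · exact absurd (pvKey_lt_of_val_lt Ampli j k hj hjn hk hkn hv) (by omega)
  · unfold pvKey at h; rw [hv] at h; omega
  · exact absurd (pvKey_lt_of_val_lt Ampli k j hk hkn hj hjn hv) (by omega)

-- loop invariant: after processing indices [0, upTo), the state holds the values and the
-- indices of the three key-largest processed indices, in strictly decreasing key order,
-- and every other processed index has a smaller key than the third one
def pvInv (Ampli : List Int) (upTo : Int) (st : (Int × Int × Int) × (Int × Int × Int)) : Prop :=
  let k := pvKey Ampli
  0 ≤ st.2.1 ∧ st.2.1 < upTo ∧ 0 ≤ st.2.2.1 ∧ st.2.2.1 < upTo ∧ 0 ≤ st.2.2.2 ∧ st.2.2.2 < upTo ∧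
  st.1.1 = pvVal Ampli st.2.1 ∧ st.1.2.1 = pvVal Ampli st.2.2.1 ∧ st.1.2.2 = pvVal Ampli st.2.2.2 ∧
  k st.2.2.1 < k st.2.1 ∧ k st.2.2.2 < k st.2.2.1 ∧
  ∀ j, 0 ≤ j → j < upTo → j ≠ st.2.1 → j ≠ st.2.2.1 → j ≠ st.2.2.2 → k j < k st.2.2.2

lemma pvLoop_inv (Ampli : List Int) :
    ∀ (rest : List Int) (upTo : Int) (st : (Int × Int × Int) × (Int × Int × Int)),
    3 ≤ upTo → rest = Ampli.drop upTo.toNat → upTo + rest.length = Ampli.length →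
    pvInv Ampli upTo st →
    pvInv Ampli Ampli.length (find3maxLoop rest (upTo - 1) st) := by
  intro rest
  induction rest with
  | nil =>
    intro upTo st _ _ hlen hinv
    simp only [find3maxLoop]
    have : upTo = (Ampli.length : Int) := by simpa using hlen
    rwa [this] at hinv
  | cons a tl ih =>
    intro upTo st h0 hdrop hlen hinv
    obtain ⟨⟨m1, m2, m3⟩, ⟨j1, j2, j3⟩⟩ := st
    obtain ⟨hb1, hu1, hb2, hu2, hb3, hu3, hm1, hm2, hm3, hk12, hk23, hoth⟩ := hinv
    simp only at hb1 hu1 hb2 hu2 hb3 hu3 hm1 hm2 hm3 hk12 hk23 hoth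
    -- the new element a sits at index upTo
    have hupn : upTo < (Ampli.length : Int) := by
      have := congrArg List.length hdrop
      simp at this
      omega
    have hval : pvVal Ampli upTo = a := by
      unfold pvVal
      rw [PySem.List.pyGet?_of_nonneg Ampli (by omega : (0:Int) ≤ upTo)]
      have h1 : Ampli.drop upTo.toNat = a :: tl := hdrop.symm
      have : Ampli[upTo.toNat]? = some a := by
        have : (List.drop upTo.toNat Ampli)[0]? = Ampli[upTo.toNat + 0]? := List.getElem?_drop
        rw [h1] at this
        simpa using this.symm
      rw [this]; rfl
    have hdrop' : tl = Ampli.drop (upTo + 1).toNat := by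
      have : (upTo + 1).toNat = upTo.toNat + 1 := by omega
      rw [this, ← List.drop_drop]
      rw [← hdrop]
      simp
    have hlen' : upTo + 1 + (tl.length : Int) = Ampli.length := by
      simp at hlen ⊢; omega
    set K := pvKey Ampli with hK
    have key_gt : ∀ j m, 0 ≤ j → j < upTo → m = pvVal Ampli j → a ≥ m → K j < K upTo := by
      intro j m hj hjup hm ham
      exact pvKey_lt_of_val_le Ampli j upTo hj (by omega) (by omega) hupn
        (by rw [← hm, hval]; exact ham) hjup
    have key_lt : ∀ j m, 0 ≤ j → j < upTo → m = pvVal Ampli j → ¬ (a ≥ m) → K upTo < K j := by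
      intro j m hj hjup hm ham
      exact pvKey_lt_of_val_lt Ampli upTo j (by omega) hupn hj (by omega)
        (by rw [← hm, hval]; omega)
    simp only [find3maxLoop]
    have harith : upTo - 1 + 1 = upTo := by omega
    rw [harith]
    split_ifs with h1 h2 h3
    · -- a ≥ m1 : new state ((a,m1,m2),(upTo,j1,j2))
      refine (fun hnext => by simpa using ih (upTo + 1) _ (by omega) hdrop' hlen' hnext) ?_
      dsimp only [pvInv]
      refine ⟨by omega, by omega, by omega, by omega, by omega, by omega, hval.symm, hm1, hm2, ?_, ?_, ?_⟩
      · exact key_gt j1 m1 hb1 hu1 hm1 h1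
      · exact hk12
      · intro j hj hjup hne1 hne2 hne3
        by_cases hj3 : j = j3
        · subst hj3; exact hk23
        · by_cases hjup' : j = upTo
          · omega
          · exact lt_trans (hoth j hj (by omega) hne2 hne3 hj3) hk23
    · -- a ≥ m2 : new state ((m1,a,m2),(j1,upTo,j2))
      refine (fun hnext => by simpa using ih (upTo + 1) _ (by omega) hdrop' hlen' hnext) ?_
      dsimp only [pvInv]
      refine ⟨by omega, by omega, by omega, by omega, by omega, by omega, hm1, hval.symm, hm2, ?_, ?_, ?_⟩
      · exact key_lt j1 m1 hb1 hu1 hm1 h1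
      · exact key_gt j2 m2 hb2 hu2 hm2 h2
      · intro j hj hjup hne1 hne2 hne3
        by_cases hj3 : j = j3
        · subst hj3; exact hk23
        · by_cases hjup' : j = upTo
          · omega
          · exact lt_trans (hoth j hj (by omega) hne1 hne3 hj3) hk23
    · -- a ≥ m3 : new state ((m1,m2,a),(j1,j2,upTo))
      refine (fun hnext => by simpa using ih (upTo + 1) _ (by omega) hdrop' hlen' hnext) ?_
      dsimp only [pvInv]
      refine ⟨by omega, by omega, by omega, by omega, by omega, by omega, hm1, hm2, hval.symm, ?_, ?_, ?_⟩
      · exact hk12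
      · exact key_lt j2 m2 hb2 hu2 hm2 h2
      · intro j hj hjup hne1 hne2 hne3
        by_cases hj3 : j = j3
        · exact hj3 ▸ key_gt j3 m3 hb3 hu3 hm3 h3
        · exact lt_trans (hoth j hj (by omega) hne1 hne2 hj3) (key_gt j3 m3 hb3 hu3 hm3 h3)
    · -- a below everything : state unchanged
      refine (fun hnext => by simpa using ih (upTo + 1) _ (by omega) hdrop' hlen' hnext) ?_
      dsimp only [pvInv]
      refine ⟨hb1, by omega, hb2, by omega, hb3, by omega, hm1, hm2, hm3, hk12, hk23, ?_⟩
      intro j hj hjup hne1 hne2 hne3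
      by_cases hjup' : j = upTo
      · subst hjup'; exact key_lt j3 m3 hb3 hu3 hm3 h3
      · exact hoth j hj (by omega) hne1 hne2 hne3

lemma pvInit_inv (x y z : Int) (rest : List Int)
    (hP1 : ¬ (y = z ∧ z < x)) (hP2 : ¬ (x = z ∧ z < y)) :
    pvInv (x :: y :: z :: rest) 3 (find3maxInit x y z) := by
  have hn : (3:Int) ≤ ((x :: y :: z :: rest).length : Int) := by
    simp only [List.length_cons]; push_cast; omega
  have v0 : pvVal (x :: y :: z :: rest) 0 = x := by
    simp [pvVal, PySem.List.pyGet?_of_nonneg _ (by norm_num : (0:Int) ≤ 0)]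
  have v1 : pvVal (x :: y :: z :: rest) 1 = y := by
    simp [pvVal, PySem.List.pyGet?_of_nonneg _ (by norm_num : (0:Int) ≤ 1)]
  have v2 : pvVal (x :: y :: z :: rest) 2 = z := by
    simp [pvVal, PySem.List.pyGet?_of_nonneg _ (by norm_num : (0:Int) ≤ 2)]
  have kk : ∀ i j : Int, 0 ≤ i → i < 3 → 0 ≤ j → j < 3 →
      (pvVal (x :: y :: z :: rest) i < pvVal (x :: y :: z :: rest) j ∨
       (pvVal (x :: y :: z :: rest) i ≤ pvVal (x :: y :: z :: rest) j ∧ i < j)) →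
      pvKey (x :: y :: z :: rest) i < pvKey (x :: y :: z :: rest) j := by
    intro i j hi hi3 hj hj3 h
    rcases h with h | ⟨h1, h2⟩
    · exact pvKey_lt_of_val_lt _ i j hi (by omega) hj (by omega) h
    · exact pvKey_lt_of_val_le _ i j hi (by omega) hj (by omega) h1 h2
  have box : ∀ st : (Int × Int × Int) × (Int × Int × Int),
      st.2.1 = 0 ∨ st.2.1 = 1 ∨ st.2.1 = 2 → st.2.2.1 = 0 ∨ st.2.2.1 = 1 ∨ st.2.2.1 = 2 →
      st.2.2.2 = 0 ∨ st.2.2.2 = 1 ∨ st.2.2.2 = 2 →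
      st.2.1 ≠ st.2.2.1 → st.2.1 ≠ st.2.2.2 → st.2.2.1 ≠ st.2.2.2 →
      st.1.1 = pvVal (x :: y :: z :: rest) st.2.1 →
      st.1.2.1 = pvVal (x :: y :: z :: rest) st.2.2.1 →
      st.1.2.2 = pvVal (x :: y :: z :: rest) st.2.2.2 →
      pvKey (x :: y :: z :: rest) st.2.2.1 < pvKey (x :: y :: z :: rest) st.2.1 →
      pvKey (x :: y :: z :: rest) st.2.2.2 < pvKey (x :: y :: z :: rest) st.2.2.1 →
      pvInv (x :: y :: z :: rest) 3 st := by
    intro st b1 b2 b3 d1 d2 d3 e1 e2 e3 k1 k2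
    exact ⟨by omega, by omega, by omega, by omega, by omega, by omega, e1, e2, e3, k1, k2,
           by intro j hj hj3 hne1 hne2 hne3; omega⟩
  by_cases c3 : z ≥ y ∧ z ≥ x
  · by_cases i3 : y ≥ x
    · -- ((z,y,x),(2,1,0))
      have e : find3maxInit x y z = (((z, y, x), (2, 1, 0)) : (Int × Int × Int) × (Int × Int × Int)) := by
        unfold find3maxInit; split_ifs <;> rfl
      rw [e]
      exact box _ (by norm_num) (by norm_num) (by norm_num) (by norm_num) (by norm_num) (by norm_num)
        v2.symm v1.symm v0.symm
        (kk 1 2 (by norm_num) (by norm_num) (by norm_num) (by norm_num)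
          (Or.inr ⟨by rw [v1, v2]; omega, by norm_num⟩))
        (kk 0 1 (by norm_num) (by norm_num) (by norm_num) (by norm_num)
          (Or.inr ⟨by rw [v0, v1]; omega, by norm_num⟩))
    · -- ((z,x,y),(2,0,1))
      have e : find3maxInit x y z = (((z, x, y), (2, 0, 1)) : (Int × Int × Int) × (Int × Int × Int)) := by
        unfold find3maxInit; split_ifs <;> first | rfl | omega
      rw [e]
      exact box _ (by norm_num) (by norm_num) (by norm_num) (by norm_num) (by norm_num) (by norm_num)
        v2.symm v0.symm v1.symm
        (kk 0 2 (by norm_num) (by norm_num) (by norm_num) (by norm_num)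
          (Or.inr ⟨by rw [v0, v2]; omega, by norm_num⟩))
        (kk 1 0 (by norm_num) (by norm_num) (by norm_num) (by norm_num)
          (Or.inl (by rw [v0, v1]; omega)))
  · by_cases c2 : y ≥ x ∧ y ≥ z
    · by_cases i2 : x ≥ z
      · -- ((y,x,z),(1,0,2)); z < x strictly: z = x would put us in the corner hP2 excludes
        have hzx : z < x := by omega
        have e : find3maxInit x y z = (((y, x, z), (1, 0, 2)) : (Int × Int × Int) × (Int × Int × Int)) := by
          unfold find3maxInit; split_ifs <;> first | rfl | omega
        rw [e]
        exact box _ (by norm_num) (by norm_num) (by norm_num) (by norm_num) (by norm_num) (by norm_num)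
          v1.symm v0.symm v2.symm
          (kk 0 1 (by norm_num) (by norm_num) (by norm_num) (by norm_num)
            (Or.inr ⟨by rw [v0, v1]; omega, by norm_num⟩))
          (kk 2 0 (by norm_num) (by norm_num) (by norm_num) (by norm_num)
            (Or.inl (by rw [v0, v2]; omega)))
      · -- ((y,z,x),(1,2,0)); z < y strictly since the third block did not fire
        have hzy : z < y := by omega
        have e : find3maxInit x y z = (((y, z, x), (1, 2, 0)) : (Int × Int × Int) × (Int × Int × Int)) := by
          unfold find3maxInit; split_ifs <;> first | rfl | omega
        rw [e]
        exact box _ (by norm_num) (by norm_num) (by norm_num) (by norm_num) (by norm_num) (by norm_num)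
          v1.symm v2.symm v0.symm
          (kk 2 1 (by norm_num) (by norm_num) (by norm_num) (by norm_num)
            (Or.inl (by rw [v1, v2]; omega)))
          (kk 0 2 (by norm_num) (by norm_num) (by norm_num) (by norm_num)
            (Or.inl (by rw [v0, v2]; omega)))
    · by_cases c1 : x ≥ y ∧ x ≥ z
      · by_cases i1 : y ≥ z
        · -- ((x,y,z),(0,1,2)); y < x and z < y strictly (hP1 excludes the y = z corner)
          have hyx : y < x := by omega
          have hzy : z < y := by omega
          have e : find3maxInit x y z = (((x, y, z), (0, 1, 2)) : (Int × Int × Int) × (Int × Int × Int)) := by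
            unfold find3maxInit; split_ifs <;> first | rfl | omega
          rw [e]
          exact box _ (by norm_num) (by norm_num) (by norm_num) (by norm_num) (by norm_num) (by norm_num)
            v0.symm v1.symm v2.symm
            (kk 1 0 (by norm_num) (by norm_num) (by norm_num) (by norm_num)
              (Or.inl (by rw [v0, v1]; omega)))
            (kk 2 1 (by norm_num) (by norm_num) (by norm_num) (by norm_num)
              (Or.inl (by rw [v1, v2]; omega)))
        · -- ((x,z,y),(0,2,1)); z < x strictly since the third block did not fire
          have hzx : z < x := by omega
          have e : find3maxInit x y z = (((x, z, y), (0, 2, 1)) : (Int × Int × Int) × (Int × Int × Int)) := by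
            unfold find3maxInit; split_ifs <;> first | rfl | omega
          rw [e]
          exact box _ (by norm_num) (by norm_num) (by norm_num) (by norm_num) (by norm_num) (by norm_num)
            v0.symm v2.symm v1.symm
            (kk 2 0 (by norm_num) (by norm_num) (by norm_num) (by norm_num)
              (Or.inl (by rw [v0, v2]; omega)))
            (kk 1 2 (by norm_num) (by norm_num) (by norm_num) (by norm_num)
              (Or.inl (by rw [v1, v2]; omega)))
      · -- one of the three ifs always fires
        exact absurd trivial (by omega)

lemma pvSorted_head3 (Ampli : List Int)
    (hn : (3:Int) ≤ (Ampli.length : Int)) (st : (Int × Int × Int) × (Int × Int × Int))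
    (h : pvInv Ampli (Ampli.length : Int) st) :
    ∃ tail, PySem.List.sorted (PySem.List.pyRange 0 (Ampli.length : Int)) (pvKey Ampli) true
      = st.2.1 :: st.2.2.1 :: st.2.2.2 :: tail := by
  obtain ⟨⟨m1, m2, m3⟩, ⟨j1, j2, j3⟩⟩ := st
  obtain ⟨hb1, hu1, hb2, hu2, hb3, hu3, hm1, hm2, hm3, hk12, hk23, hoth⟩ := h
  simp only at hb1 hu1 hb2 hu2 hb3 hu3 hm1 hm2 hm3 hk12 hk23 hoth ⊢
  set n := (Ampli.length : Int) with hn'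
  set K := pvKey Ampli with hK
  have hKinj : ∀ j k : Int, 0 ≤ j → j < n → 0 ≤ k → k < n → K j = K k → j = k := by
    intro j k a b c d e; exact pvKey_inj Ampli j k a b c d e
  have hne12 : j1 ≠ j2 := fun e => by rw [e] at hk12; omega
  have hne13 : j1 ≠ j3 := fun e => by rw [e] at hk12; omega
  have hne23 : j2 ≠ j3 := fun e => by rw [e] at hk23; omega
  set p : Int → Bool := fun j => decide (j = j1 ∨ j = j2 ∨ j = j3) with hp
  set R := PySem.List.pyRange 0 n with hR
  set S := PySem.List.sorted (R.filter (fun j => !p j)) K true with hS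
  have hRno : R.Nodup := PySem.List.nodup_pyRange_one 0 n
  have hmemR : ∀ x : Int, x ∈ R ↔ 0 ≤ x ∧ x < n := fun x => PySem.List.mem_pyRange_one
  have hSperm : S.Perm (R.filter (fun j => !p j)) := PySem.List.sorted_perm _ _ _
  have hSno : S.Nodup := hSperm.nodup_iff.mpr (hRno.filter _)
  have hSmem : ∀ x : Int, x ∈ S ↔ (0 ≤ x ∧ x < n ∧ ¬(x = j1 ∨ x = j2 ∨ x = j3)) := by
    intro x
    rw [hSperm.mem_iff, List.mem_filter, hmemR]
    simp [hp, and_assoc]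
  have hhead : (R.filter p).Perm [j1, j2, j3] := by
    apply (List.perm_ext_iff_of_nodup (hRno.filter _) (by simp [hne12, hne13, hne23])).mpr
    intro x
    rw [List.mem_filter, hmemR]
    constructor
    · rintro ⟨_, hx⟩
      simp only [hp] at hx
      rcases of_decide_eq_true hx with h | h | h <;> simp [h]
    · intro hx
      simp only [List.mem_cons, List.not_mem_nil, or_false] at hx
      rcases hx with h | h | h <;> subst h <;>
        refine ⟨⟨by omega, by omega⟩, by simp [hp]⟩
  have hperm : (j1 :: j2 :: j3 :: S).Perm R := by
    have h1 : (j1 :: j2 :: j3 :: S).Perm ((R.filter p) ++ (R.filter (fun j => !p j))) :=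
      List.Perm.append hhead.symm hSperm
    exact h1.trans (List.filter_append_perm p R)
  have hSbelow : ∀ s ∈ S, K s < K j3 := by
    intro s hs
    rw [hSmem] at hs
    exact hoth s hs.1 hs.2.1 (fun e => hs.2.2 (Or.inl e)) (fun e => hs.2.2 (Or.inr (Or.inl e)))
      (fun e => hs.2.2 (Or.inr (Or.inr e)))
  have hSpair : S.Pairwise (fun a b => K b < K a) := by
    have h1 : S.Pairwise (fun a b => K b ≤ K a) := PySem.List.sorted_pairwise_rev _ _
    have h2 : S.Pairwise (fun a b : Int => a ≠ b) := hSno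
    refine ((h1.and h2).imp_of_mem ?_)
    intro a b ha hb ⟨hle, hne⟩
    rcases lt_or_eq_of_le hle with h | h
    · exact h
    · exact absurd (hKinj b a ((hSmem b).mp hb).1 ((hSmem b).mp hb).2.1 ((hSmem a).mp ha).1
        ((hSmem a).mp ha).2.1 h) (fun e => hne (e.symm))
  have hpw : (j1 :: j2 :: j3 :: S).Pairwise (fun a b => K b < K a) := by
    refine List.Pairwise.cons ?_ (List.Pairwise.cons ?_ (List.Pairwise.cons ?_ hSpair))
    · intro b hb
      rcases List.mem_cons.mp hb with h | h
      · rw [h]; exact hk12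
      · rcases List.mem_cons.mp h with h' | h'
        · rw [h']; exact lt_trans hk23 hk12
        · exact lt_trans (lt_trans (hSbelow b h') hk23) hk12
    · intro b hb
      rcases List.mem_cons.mp hb with h | h
      · rw [h]; exact hk23
      · exact lt_trans (hSbelow b h) hk23
    · intro b hb
      exact hSbelow b hb
  exact ⟨S, PySem.List.sorted_rev_eq_of_perm_of_pairwise_gt R (j1 :: j2 :: j3 :: S) K hperm hpw⟩

-- ----- bridging Source B's tuple-key ascending sort to the single-key descending sort -----

lemma pvInsertBy_congr {α : Type} (f g : α → α → Bool) (x : α) :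
    ∀ (ys : List α), (∀ y ∈ ys, f x y = g x y) →
    PySem.List.insertBy f x ys = PySem.List.insertBy g x ys := by
  intro ys
  induction ys with
  | nil => intro _; rfl
  | cons y t ih =>
    intro h
    simp only [PySem.List.insertBy]
    rw [h y (List.mem_cons_self), ih (fun u hu => h u (List.mem_cons_of_mem y hu))]

lemma pvFoldl_insertBy_congr {α : Type} (f g : α → α → Bool) :
    ∀ (xs acc : List α), (∀ x ∈ xs, ∀ y ∈ acc, f x y = g x y) →
    (∀ x ∈ xs, ∀ y ∈ xs, f x y = g x y) →
    xs.foldl (fun a x => PySem.List.insertBy f x a) acc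
      = xs.foldl (fun a x => PySem.List.insertBy g x a) acc := by
  intro xs
  induction xs with
  | nil => intro acc _ _; rfl
  | cons x t ih =>
    intro acc hacc hxs
    simp only [List.foldl_cons]
    rw [pvInsertBy_congr f g x acc (hacc x (List.mem_cons_self))]
    apply ih
    · intro u hu y hy
      rcases (PySem.List.mem_insertBy g x y acc).mp hy with h | h
      · exact hxs u (List.mem_cons_of_mem x hu) y (by rw [h]; exact List.mem_cons_self)
      · exact hacc u (List.mem_cons_of_mem x hu) y h
    · intro u hu y hy
      exact hxs u (List.mem_cons_of_mem x hu) y (List.mem_cons_of_mem x hy)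

-- the two comparators agree on in-range indices
lemma pvCmp_eq (Ampli : List Int) (i j : Int)
    (hi0 : 0 ≤ i) (hin : i < (Ampli.length : Int)) (hj0 : 0 ≤ j) (hjn : j < (Ampli.length : Int)) :
    (decide ((-(pvVal Ampli i)) < (-(pvVal Ampli j))) ||
      (!decide ((-(pvVal Ampli j)) < (-(pvVal Ampli i))) && decide ((-i : Int) < -j)))
    = decide (pvKey Ampli j < pvKey Ampli i) := by
  rw [Bool.eq_iff_iff]
  simp only [Bool.or_eq_true, Bool.and_eq_true, Bool.not_eq_true', decide_eq_true_iff,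
    decide_eq_false_iff_not]
  constructor
  · rintro (h | ⟨h1, h2⟩)
    · exact pvKey_lt_of_val_lt Ampli j i hj0 hjn hi0 hin (by omega)
    · exact pvKey_lt_of_val_le Ampli j i hj0 hjn hi0 hin (by omega) (by omega)
  · intro h
    by_cases hv : pvVal Ampli j < pvVal Ampli i
    · left; omega
    · right
      constructor
      · intro hcon
        exact absurd (pvKey_lt_of_val_lt Ampli i j hi0 hin hj0 hjn (by omega)) (by omega)
      · by_contra hij
        rcases lt_or_eq_of_le (by omega : i ≤ j) with h' | h'
        · exact absurd (pvKey_lt_of_val_le Ampli i j hi0 hin hj0 hjn (by omega) h') (by omega)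
        · subst h'; omega

lemma pvSorted2_eq (Ampli : List Int) :
    PySem.List.sorted2 (PySem.List.pyRange 0 (Ampli.length : Int))
      (fun i => -(pvVal Ampli i)) (fun i => -i)
    = PySem.List.sorted (PySem.List.pyRange 0 (Ampli.length : Int)) (pvKey Ampli) true := by
  rw [PySem.List.sorted_rev_eq_foldl_insertBy]
  show (PySem.List.pyRange 0 (Ampli.length : Int)).foldl
      (fun acc x => PySem.List.insertBy
        (fun a b => decide ((-(pvVal Ampli a)) < (-(pvVal Ampli b))) ||
          (!decide ((-(pvVal Ampli b)) < (-(pvVal Ampli a))) && decide ((-a : Int) < -b))) x acc) []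
    = _
  apply pvFoldl_insertBy_congr
  · intro x _ y hy; exact absurd hy (List.not_mem_nil)
  · intro x hx y hy
    have hx' := PySem.List.mem_pyRange_one.mp hx
    have hy' := PySem.List.mem_pyRange_one.mp hy
    exact pvCmp_eq Ampli x y hx'.1 hx'.2 hy'.1 hy'.2

-- ===== VERDICT (by name: the statement is the Claim_ definition above) =====
theorem find3max_spec : Claim_equal_find3max := by
  intro Ampli _ hpre
  obtain ⟨hlen, hp1, hp2⟩ := hpre
  unfold Spec_find3max
  match Ampli, hlen, hp1, hp2 with
  | x :: y :: z :: rest, hlen, hp1, hp2 =>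
  have hp1' : ¬ (y = z ∧ z < x) := by simpa [List.getD] using hp1
  have hp2' : ¬ (x = z ∧ z < y) := by simpa [List.getD] using hp2
  have hn : (3:Int) ≤ ((x :: y :: z :: rest).length : Int) := by
    simp only [List.length_cons]; push_cast; omega
  have hinv3 := pvInit_inv x y z rest hp1' hp2'
  have hloop := pvLoop_inv (x :: y :: z :: rest) rest 3 (find3maxInit x y z)
    (by norm_num) (by rfl) (by simp only [List.length_cons]; push_cast; omega) hinv3
  have h2 : (3 : Int) - 1 = 2 := by norm_num
  rw [h2] at hloop
  obtain ⟨tail, hsorted⟩ := pvSorted_head3 (x :: y :: z :: rest) hn _ hloop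
  show (find3maxLoop rest 2 (find3maxInit x y z)).2 = find3max_alt (x :: y :: z :: rest)
  unfold find3max_alt
  simp only
  rw [pvSorted2_eq, hsorted]
  simp [PySem.List.pyGet?_of_nonneg _ (by norm_num : (0:Int) ≤ 0),
        PySem.List.pyGet?_of_nonneg _ (by norm_num : (0:Int) ≤ 1),
        PySem.List.pyGet?_of_nonneg _ (by norm_num : (0:Int) ≤ 2)]
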